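-- pv_equiv track=rewrite | github.com/arpanauts/biomapper | biomapper/core/strategy_actions/entities/chemistry/identification/extract_loinc.py | calculate_loinc_check_digit
-- ===== SOURCE A (Python) =====
-- def calculate_loinc_check_digit(main_part: str) -> str:
--     """Calculate LOINC check digit using mod 10 algorithm.
--
--     LOINC check digits are calculated using a specific mod-10 algorithm.
--
--     Args:
--         main_part: The main numeric part of the LOINC code
--
--     Returns:
--         The calculated check digit as string
--     """
--     if not main_part or not main_part.isdigit():
--         return "0"
--
--     # LOINC check digit algorithm
--     # Based on the standard LOINC check digit calculation
--     total = 0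
--     for i, char in enumerate(main_part):
--         digit = int(char)
--         # Weight alternates between 2 and 1, starting with 1 for rightmost
--         weight = 2 if (len(main_part) - i - 1) % 2 == 1 else 1
--         product = digit * weight
--
--         # Add digits of product
--         if product > 9:
--             total += (product // 10) + (product % 10)
--         else:
--             total += product
--
--     # Check digit is what makes total mod 10 equal 0
--     check_digit = (10 - (total % 10)) % 10
--     return str(check_digit)
-- ===== SOURCE B (Python) =====
-- def calculate_loinc_check_digit(main_part: str) -> str:
--     """Calculate LOINC check digit using mod 10 algorithm.
--
--     Different decomposition: reverse once, split into the weight-1 slice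
--     (r[0::2]) and the to-be-doubled slice (r[1::2]); rebuild a plain decimal
--     string in which each doubled digit appears as the literal decimal of 2*d,
--     then take one flat digit-sum of that string.  No per-position weight and
--     no carry branch: summing the decimal digits of 2*d IS the 'add digits of
--     product' step.
--     """
--     if not main_part.isdigit():
--         return "0"
--     r = main_part[::-1]
--     weight1 = r[0::2]
--     weight2 = r[1::2]
--     expanded = weight1 + "".join(str(2 * int(c)) for c in weight2)
--     total = sum(int(ch) for ch in expanded)
--     return str(-total % 10)
-- ===== Notes on version B (the rewrite author's own statement) =====
-- stated objective: alternative
-- what changed: Replaces the single weighted loop (per-index weight from position parity, explicit product//10+product%10 carry branch) by staged passes: reverse once, slice into r[0::2] and r[1::2], rebuild an expanded decimal string where each doubled digit appears as the literal decimal of 2*d, and take one flat digit-sum of that string; the check digit is -total % 10.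
import Mathlib
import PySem

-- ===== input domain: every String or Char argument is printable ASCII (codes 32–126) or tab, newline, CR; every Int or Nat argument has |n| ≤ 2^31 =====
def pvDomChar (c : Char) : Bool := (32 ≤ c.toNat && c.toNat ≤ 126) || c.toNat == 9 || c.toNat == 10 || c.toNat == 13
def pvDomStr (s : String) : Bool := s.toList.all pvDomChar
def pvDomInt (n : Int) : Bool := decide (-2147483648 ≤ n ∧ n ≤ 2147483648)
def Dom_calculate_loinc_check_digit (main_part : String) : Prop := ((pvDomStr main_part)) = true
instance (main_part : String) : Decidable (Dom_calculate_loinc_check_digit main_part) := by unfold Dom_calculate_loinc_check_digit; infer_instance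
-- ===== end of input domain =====

-- B recomputes the checksum by staged passes: reverse once, slice into r[0::2] and r[1::2],
-- expand the doubled digits into a plain decimal string and take one flat digit-sum;
-- same value on every input (objective: alternative).

-- int(c) for a single char that the isdigit guard guarantees to be an ASCII digit: exact there.
def pyDigit (c : Char) : Int := (c.toNat : Int) - 48

-- ===== PORT A =====
-- the body of A's `for i, char in enumerate(main_part)` loop (n = len(main_part))
def bodyA (n : Int) (total : Int) (p : Int × Char) : Int :=
  let digit := pyDigit p.2
  let weight : Int := if PySem.Int.mod (n - p.1 - 1) 2 == 1 then 2 else 1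
  let product := digit * weight
  if product > 9 then total + (PySem.Int.floordiv product 10 + PySem.Int.mod product 10)
  else total + product

def calculate_loinc_check_digit (main_part : String) : String :=
  if main_part == "" || !(PySem.Str.strIsdigit main_part) then "0"
  else
    let total := (PySem.List.enumerate main_part.toList).foldl (bodyA (PySem.Str.len main_part)) 0
    let check_digit := PySem.Int.mod (10 - PySem.Int.mod total 10) 10
    PySem.Int.toStr check_digit

-- ===== PORT B =====
-- Source B's slices r[::-1], r[0::2], r[1::2]; a slice with step -1/2 never raises, so `.getD []` is exact
def calculate_loinc_check_digit_alt (main_part : String) : String :=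
  if !(PySem.Str.strIsdigit main_part) then "0"
  else
    let r := (PySem.List.slice? main_part.toList none none (-1)).getD []
    let weight1 := (PySem.List.slice? r (some 0) none 2).getD []
    let weight2 := (PySem.List.slice? r (some 1) none 2).getD []
    -- expanded = weight1 + "".join(str(2*int(c)) for c in weight2)
    let expanded := weight1 ++ (weight2.map (fun c => PySem.Int.toChars (2 * pyDigit c))).flatten
    -- total = sum(int(ch) for ch in expanded)
    let total := (expanded.map pyDigit).sum
    PySem.Int.toStr (PySem.Int.mod (-total) 10)

-- ===== PRECONDITION & SPEC =====
def Spec_calculate_loinc_check_digit (main_part : String) (out : String) : Prop := out = calculate_loinc_check_digit_alt main_part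
instance (main_part : String) (out : String) : Decidable (Spec_calculate_loinc_check_digit main_part out) := by unfold Spec_calculate_loinc_check_digit; infer_instance

-- ===== CLAIM (what is proved, stated in full; the proofs are below) =====
def Claim_equal_calculate_loinc_check_digit : Prop := ∀ (main_part : String), Dom_calculate_loinc_check_digit main_part → Spec_calculate_loinc_check_digit main_part (calculate_loinc_check_digit main_part)

-- ===== LEMMAS AND PROOFS =====

-- the elements of xs at even indices (what the slice xs[0::2] selects)
def evens {α : Type} : List α → List α
  | [] => []
  | [x] => [x]
  | x :: _ :: r => x :: evens r

theorem evens_cons_eq {α : Type} (y : α) (r : List α) : evens (y :: r) = y :: evens r.tail := by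
  cases r <;> rfl

theorem filterMap_stride {α : Type} (xs : List α) :
    List.filterMap (fun k => xs[2 * k]?) (List.range ((xs.length + 1) / 2)) = evens xs := by
  induction xs using evens.induct with
  | case1 => simp [evens]
  | case2 x => simp [List.range_succ, evens]
  | case3 x y r ih =>
    have hc : ((x :: y :: r).length + 1) / 2 = (r.length + 1) / 2 + 1 := by
      simp only [List.length_cons]; omega
    rw [hc, List.range_succ_eq_map, List.filterMap_cons, List.filterMap_map]
    have hf : ((fun k => (x :: y :: r)[2 * k]?) ∘ Nat.succ) = fun k => r[2 * k]? := by
      funext k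
      have h2 : 2 * Nat.succ k = (2 * k + 1) + 1 := by omega
      simp [Function.comp, h2]
    simp only [hf, ih, Nat.mul_zero, List.getElem?_cons_zero, evens]

-- characterisation of the step-2 slices B takes
theorem slice?_zero_two {α : Type} (xs : List α) :
    PySem.List.slice? xs (some 0) none 2 = some (evens xs) := by
  simp only [PySem.List.slice?, PySem.List.sliceIndices]
  norm_num
  have hcount : (if 0 < xs.length then (((xs.length:Int) + 2 - 1) / 2).toNat else 0)
      = (xs.length + 1) / 2 := by split <;> omega
  have hf : (fun k : Nat => xs[(2 * (k:Int)).toNat]?) = fun k => xs[2 * k]? := by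
    funext k
    have h : (2 * (k:Int)).toNat = 2 * k := by omega
    rw [h]
  rw [hcount, hf, filterMap_stride]

theorem slice?_one_two {α : Type} (xs : List α) :
    PySem.List.slice? xs (some 1) none 2 = some (evens xs.tail) := by
  cases xs with
  | nil => rfl
  | cons x t =>
    simp only [PySem.List.slice?, PySem.List.sliceIndices]
    norm_num
    have hcount : (if 0 < t.length then (((t.length:Int) + 2 - 1) / 2).toNat else 0)
        = (t.length + 1) / 2 := by split <;> omega
    have hf : (fun k : Nat => (x :: t)[((1:Int) + 2 * (k:Int)).toNat]?) = fun k => t[2 * k]? := by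
      funext k
      have hi : ((1:Int) + 2 * (k:Int)).toNat = 2 * k + 1 := by omega
      simp [hi]
    rw [hcount, hf, filterMap_stride]

-- digit sum of str(2*d) for a decimal digit d: exactly A's carry fold
theorem dsum_val (d : Int) (h0 : 0 ≤ d) (h9 : d ≤ 9) :
    ((PySem.Int.toChars (2 * d)).map pyDigit).sum = if 2 * d > 9 then 2 * d - 9 else 2 * d := by
  interval_cases d <;> decide

-- the contribution of one char of A's loop, as a function of its distance j from the right end
def termA (j : Int) (c : Char) : Int :=
  let digit := pyDigit c
  let weight : Int := if PySem.Int.mod j 2 == 1 then 2 else 1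
  let product := digit * weight
  if product > 9 then PySem.Int.floordiv product 10 + PySem.Int.mod product 10
  else product

-- A's total, by recursion on the string from the left
def TA : List Char → Int
  | [] => 0
  | c :: rest => termA (rest.length : Int) c + TA rest

theorem add_ite_eq {c : Prop} [Decidable c] (t x y : Int) :
    (if c then t + x else t + y) = t + (if c then x else y) := by split <;> rfl

theorem bodyA_eq (n t : Int) (p : Int × Char) : bodyA n t p = t + termA (n - p.1 - 1) p.2 := by
  simp only [bodyA, termA]
  exact add_ite_eq t _ _

theorem foldA (L : List Char) (s n a : Int) (hn : n = s + L.length) :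
    (PySem.List.enumerate L s).foldl (bodyA n) a = a + TA L := by
  induction L generalizing s a with
  | nil => simp [PySem.List.enumerate, TA]
  | cons c rest ih =>
    rw [PySem.List.enumerate_cons]
    simp only [List.foldl_cons, TA]
    rw [ih (s + 1) _ (by push_cast [List.length_cons] at hn ⊢; omega), bodyA_eq]
    have hns : n - s - 1 = (rest.length : Int) := by
      push_cast [List.length_cons] at hn; omega
    rw [hns]; ring

def dsum (c : Char) : Int := ((PySem.Int.toChars (2 * pyDigit c)).map pyDigit).sum

-- B's total on the reversed string, structurally
def SB : List Char → Int
  | [] => 0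
  | [c] => pyDigit c
  | c0 :: c1 :: r => pyDigit c0 + dsum c1 + SB r

theorem SB_eq_slices (M : List Char) :
    ((evens M).map pyDigit).sum + ((evens M.tail).map dsum).sum = SB M := by
  induction M using SB.induct with
  | case1 => rfl
  | case2 c => simp [evens, SB]
  | case3 c0 c1 r ih =>
    show ((evens (c0 :: c1 :: r)).map pyDigit).sum + ((evens (c1 :: r)).map dsum).sum = _
    rw [show evens (c0 :: c1 :: r) = c0 :: evens r from rfl, evens_cons_eq c1 r]
    simp only [List.map_cons, List.sum_cons, SB]
    rw [← ih]
    ring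

theorem SB_append (xs : List Char) (c : Char) :
    SB (xs ++ [c]) = SB xs + (if xs.length % 2 == 1 then dsum c else pyDigit c) := by
  induction xs using SB.induct with
  | case1 => simp [SB]
  | case2 x => simp [SB]
  | case3 x0 x1 rest ih =>
    simp only [List.cons_append, SB, ih, List.length_cons]
    have hp : (rest.length + 1 + 1) % 2 = rest.length % 2 := by omega
    simp only [hp]
    ring

theorem pyDigit_bounds (c : Char) (hc : PySem.Chars.isdigit c = true) :
    0 ≤ pyDigit c ∧ pyDigit c ≤ 9 := by
  simp only [PySem.Chars.isdigit, Bool.and_eq_true, decide_eq_true_eq] at hc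
  have h1 : 48 ≤ c.toNat := Nat.succ_le_of_lt hc.1
  have h2 : c.toNat ≤ 57 := Fin.mk_le_mk.mp hc.2
  simp only [pyDigit]
  omega

theorem termA_digit (j : Nat) (c : Char) (hc : PySem.Chars.isdigit c = true) :
    termA (j : Int) c = (if j % 2 == 1 then dsum c else pyDigit c) := by
  have hd := pyDigit_bounds c hc
  rw [dsum, dsum_val _ hd.1 hd.2]
  simp only [termA]
  rw [PySem.Int.mod_eq_emod_of_pos (by norm_num : (0:Int) < 2)]
  by_cases hp : j % 2 = 1
  · have hb : ((j : Int) % 2 == 1) = true := beq_iff_eq.mpr (by omega)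
    have hb2 : ((j % 2 : Nat) == 1) = true := beq_iff_eq.mpr hp
    simp only [hb, hb2, if_true]
    rw [PySem.Int.floordiv_eq_ediv_of_pos (by norm_num : (0:Int) < 10),
        PySem.Int.mod_eq_emod_of_pos (by norm_num : (0:Int) < 10)]
    split_ifs <;> omega
  · have hb : ((j : Int) % 2 == 1) = false := beq_false_of_ne (by omega)
    have hb2 : ((j % 2 : Nat) == 1) = false := beq_false_of_ne hp
    simp only [hb, hb2, if_false, Bool.false_eq_true]
    rw [if_neg (by omega : ¬ pyDigit c * 1 > 9)]
    ring

theorem TA_eq_SB (L : List Char) (hd : ∀ c ∈ L, PySem.Chars.isdigit c = true) :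
    TA L = SB L.reverse := by
  induction L with
  | nil => rfl
  | cons c rest ih =>
    simp only [TA, List.reverse_cons]
    rw [SB_append, ih (fun x hx => hd x (List.mem_cons_of_mem _ hx))]
    rw [termA_digit _ _ (hd c (List.mem_cons_self ..))]
    simp only [List.length_reverse]
    ring

theorem final_mod (t : Int) :
    PySem.Int.mod (10 - PySem.Int.mod t 10) 10 = PySem.Int.mod (-t) 10 := by
  simp only [PySem.Int.mod_eq_emod_of_pos (by norm_num : (0:Int) < 10)]
  omega

-- ===== VERDICT (by name: the statement is the Claim_ definition above) =====
theorem calculate_loinc_check_digit_spec : Claim_equal_calculate_loinc_check_digit := by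
  intro main_part _
  unfold Spec_calculate_loinc_check_digit calculate_loinc_check_digit calculate_loinc_check_digit_alt
  by_cases hdig : PySem.Str.strIsdigit main_part = true
  · by_cases he : main_part = ""
    · rw [he] at hdig; exact absurd hdig (by decide)
    have hne : (main_part == "") = false := beq_false_of_ne he
    simp only [hne, hdig, Bool.not_true, Bool.or_false, Bool.false_eq_true, if_false]
    have hall : ∀ c ∈ main_part.toList, PySem.Chars.isdigit c = true := by
      have h := hdig
      simp only [PySem.Str.strIsdigit, PySem.Chars.strIsdigit, Bool.and_eq_true,
        List.all_eq_true] at h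
      exact fun c hc => h.2 c hc
    have hlen : PySem.Str.len main_part = (main_part.toList.length : Int) := by
      simp [PySem.Str.len_eq]
    rw [hlen, foldA main_part.toList 0 _ 0 (by omega)]
    rw [PySem.List.slice?_none_none_neg_one, Option.getD_some]
    rw [slice?_zero_two, slice?_one_two, Option.getD_some, Option.getD_some]
    simp only [zero_add, List.map_append, List.sum_append, List.map_flatten, List.map_map,
      List.sum_flatten]
    have hds : List.map (List.sum ∘ List.map pyDigit ∘ fun c => PySem.Int.toChars (2 * pyDigit c))
        (evens main_part.toList.reverse.tail) = List.map dsum (evens main_part.toList.reverse.tail) := rfl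
    rw [hds, SB_eq_slices, TA_eq_SB main_part.toList hall, final_mod]
  · have hdig' : PySem.Str.strIsdigit main_part = false := by
      cases h : PySem.Str.strIsdigit main_part with
      | true => exact absurd h hdig
      | false => rfl
    have hd2 : PySem.Chars.strIsdigit main_part.toList = false := by
      simpa [PySem.Str.strIsdigit] using hdig'
    simp [hd2]
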